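-- pv_equiv track=rewrite | github.com/fritzrehde/competitive-programming | unsw-cpmsoc/mazaalai-contest/pears/pears.py | brute_force_islice
-- ===== SOURCE A (Python) =====
-- from itertools import islice
-- from typing import Tuple
--
-- def brute_force_islice(n: int, k: int) -> Tuple[int, int]:
--     """
--     Approach:  Brute-force, with islice.
--     Idea:      Find the kth pair by iterating over all pairs lazily.
--     Time:      O(k): There are 2^n possible pairs, but we lazily generate the pairs and only iterate over the first k pairs.
--     Space:     O(1): No additional memory is used (we do not allocate a list of all pairs).
--     """
--
--     def pairs():
--         for i in range(1, n):
--             for j in range(i + 1, n + 1):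
--                 yield (i, j)
--
--     def nth(iterable, n: int):
--         # n is 1-indexed.
--         return next(islice(iterable, n - 1, None))
--
--     return nth(pairs(), k)
-- ===== SOURCE B (Python) =====
-- def brute_force_islice(n: int, k: int):
--     if not (1 <= k <= n * (n - 1) // 2):
--         raise ValueError("k is not the index of a pair")
--     # Skip whole rows: row i (pairs (i, i+1..n)) has n-i pairs.
--     i = 1
--     while i < n and n - i < k:
--         k -= n - i
--         i += 1
--     return (i, i + k)
-- ===== Notes on version B (the rewrite author's own statement) =====
-- stated objective: faster
-- what changed: Instead of lazily enumerating every pair up to the kth, B validates k and then skips whole rows at once (row i holds n-i pairs), subtracting row sizes from k until the kth pair's row is found.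
import Mathlib
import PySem

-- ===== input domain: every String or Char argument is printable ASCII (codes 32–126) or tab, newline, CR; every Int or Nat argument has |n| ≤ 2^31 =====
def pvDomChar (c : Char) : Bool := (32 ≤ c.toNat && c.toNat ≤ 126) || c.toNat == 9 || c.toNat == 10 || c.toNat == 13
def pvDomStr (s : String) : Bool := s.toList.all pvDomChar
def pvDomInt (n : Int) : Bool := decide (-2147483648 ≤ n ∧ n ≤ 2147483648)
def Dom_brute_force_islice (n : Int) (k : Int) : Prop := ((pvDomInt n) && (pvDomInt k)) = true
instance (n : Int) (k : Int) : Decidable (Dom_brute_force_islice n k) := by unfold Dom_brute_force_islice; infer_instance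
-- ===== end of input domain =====

-- B replaces A's lazy pair-by-pair enumeration by row skipping (row i holds n-i pairs): asymptotically fewer steps.

-- ===== PORT A =====
-- The generator pairs() yields (i, j) for i in range(1, n), j in range(i+1, n+1), and
-- nth = next(islice(it, k-1, None)) consumes exactly k yielded pairs. Port: a state machine
-- stepping the generator one event at a time (state = current i, j, pairs still to consume c);
-- each step is either one yield or one advance to the next row, exactly the generator's events.
-- Fuel 2*k+2 bounds the events consumed (every row yields at least once, so ≤ k yields + k+1
-- row advances happen before the kth yield); fuel only makes the same computation total.
-- Python raises (ValueError for k < 1, StopIteration when fewer than k pairs exist);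
-- Pre_ excludes those inputs and the port returns (0, 0) there.
def pvNthPairs (n : Int) : Nat → Int → Int → Int → Option (Int × Int)
  | 0, _, _, _ => none
  | f + 1, i, j, c =>
    if j ≤ n then
      if c ≤ 1 then some (i, j) else pvNthPairs n f i (j + 1) (c - 1)
    else if i + 1 < n then pvNthPairs n f (i + 1) (i + 2) c
    else none

def brute_force_islice (n : Int) (k : Int) : Int × Int :=
  if 1 ≤ k ∧ 1 < n then (pvNthPairs n (2 * k.toNat + 2) 1 2 k).getD (0, 0) else (0, 0)

-- ===== PORT B =====
-- fuel (n-1).toNat: the while loop runs at most while i < n, i starting at 1.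
-- B raises ValueError on k outside 1..n(n-1)//2 (excluded by Pre_); the port returns (0, 0) there.
def pvAltLoop (n : Int) : Nat → Int → Int → Int × Int
  | 0, i, k => (i, i + k)
  | f + 1, i, k =>
    if i < n ∧ n - i < k then pvAltLoop n f (i + 1) (k - (n - i)) else (i, i + k)

def brute_force_islice_alt (n : Int) (k : Int) : Int × Int :=
  if 1 ≤ k ∧ k ≤ PySem.Int.floordiv (n * (n - 1)) 2 then pvAltLoop n (n - 1).toNat 1 k
  else (0, 0)

-- ===== PRECONDITION & SPEC =====
-- Pre_: exactly the inputs where A returns normally: at least one pair exists and 1 ≤ k ≤ n(n-1)/2.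
def Pre_brute_force_islice (n : Int) (k : Int) : Prop := 2 ≤ n ∧ 1 ≤ k ∧ 2 * k ≤ n * (n - 1)
instance (n : Int) (k : Int) : Decidable (Pre_brute_force_islice n k) := by
  unfold Pre_brute_force_islice; infer_instance
def pvWitness_brute_force_islice : Int × Int := (4, 5)

def Spec_brute_force_islice (n : Int) (k : Int) (out : Int × Int) : Prop := out = brute_force_islice_alt n k
instance (n : Int) (k : Int) (out : Int × Int) : Decidable (Spec_brute_force_islice n k out) := by unfold Spec_brute_force_islice; infer_instance

-- ===== CLAIM (what is proved, stated in full; the proofs are below) =====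
def Claim_equal_brute_force_islice : Prop := ∀ (n : Int) (k : Int), Dom_brute_force_islice n k → Pre_brute_force_islice n k → Spec_brute_force_islice n k (brute_force_islice n k)

-- ===== LEMMAS AND PROOFS =====

/-- Walking within row `i`: if the remaining count `c` fits in the row, the generator
    stops at `(i, j + c - 1)`. -/
theorem pvRowHit (f : Nat) : ∀ (n i j c : Int), 1 ≤ c → c ≤ n - j + 1 → c.toNat ≤ f →
    pvNthPairs n f i j c = some (i, j + c - 1) := by
  induction f with
  | zero => intro n i j c h1 h2 hf; omega
  | succ f ih =>
    intro n i j c h1 h2 hf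
    rw [pvNthPairs, if_pos (by omega)]
    by_cases hc : c ≤ 1
    · have : c = 1 := by omega
      rw [if_pos hc, this]; norm_num
    · rw [if_neg hc, ih n i (j + 1) (c - 1) (by omega) (by omega) (by omega)]
      have : j + 1 + (c - 1) - 1 = j + c - 1 := by ring
      rw [this]

/-- Skipping the rest of row `i` (it has `m + 1` pairs left, all consumed) and advancing
    to row `i + 1`. -/
theorem pvRowSkip : ∀ (m : Nat) (n i j c : Int) (g : Nat), i + 1 < n → i + 1 ≤ j →
    j + m = n → (m : Int) + 1 < c →
    pvNthPairs n (g + m + 2) i j c = pvNthPairs n g (i + 1) (i + 2) (c - ((m : Int) + 1)) := by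
  intro m
  induction m with
  | zero =>
    intro n i j c g hn hij hj hc
    rw [pvNthPairs, if_pos (by omega), if_neg (by omega),
        pvNthPairs, if_neg (by omega), if_pos hn]
    norm_num
  | succ m ih =>
    intro n i j c g hn hij hj hc
    have hstep : g + (m + 1) + 2 = (g + m + 2) + 1 := by omega
    rw [hstep, pvNthPairs, if_pos (by push_cast at hj ⊢; omega), if_neg (by push_cast at hc ⊢; omega)]
    rw [ih n i (j + 1) (c - 1) g hn (by omega) (by push_cast at hj ⊢; omega) (by push_cast at hc ⊢; omega)]
    congr 1
    push_cast
    ring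

/-- Core correspondence: the generator walk from the start of row `i` equals B's
    row-skipping loop with fuel `(n - i).toNat`, given enough generator fuel. -/
theorem pvMain (f : Nat) : ∀ (n i k : Int) (g : Nat), 1 ≤ i → i < n → 1 ≤ k →
    2 * k ≤ (n - i) * (n - i + 1) → (2 * k).toNat ≤ g → f = (n - i).toNat →
    pvNthPairs n g i (i + 1) k = some (pvAltLoop n f i k) := by
  induction f with
  | zero => intro n i k g h1 h2 h3 h4 hg hf; omega
  | succ f ih =>
    intro n i k g h1 h2 h3 h4 hg hf
    rw [pvAltLoop]
    by_cases hk : n - i < k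
    · -- the kth pair is beyond row i: consume the whole row, advance, recurse
      have hni : 2 ≤ n - i := by nlinarith
      set m : Nat := (n - i - 1).toNat with hm
      have hmc : (m : Int) = n - i - 1 := by omega
      have hgge : m + 2 ≤ g := by omega
      have hsplit : g = (g - m - 2) + m + 2 := by omega
      rw [hsplit, pvRowSkip m n i (i + 1) k (g - m - 2) (by omega) (by omega) (by omega) (by omega)]
      rw [if_pos ⟨h2, hk⟩]
      have harg : k - ((m : Int) + 1) = k - (n - i) := by omega
      rw [harg]
      have hrec := ih n (i + 1) (k - (n - i)) (g - m - 2) (by omega) (by omega) (by omega)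
        (by nlinarith) (by omega) (by omega)
      rw [show (i : Int) + 1 + 1 = i + 2 from by ring] at hrec
      exact hrec
    · -- the kth pair is inside row i
      rw [if_neg (by tauto), pvRowHit g n i (i + 1) k h3 (by omega) (by omega)]
      have : i + 1 + k - 1 = i + k := by ring
      rw [this]

-- ===== VERDICT (by name: the statement is the Claim_ definition above) =====
theorem brute_force_islice_spec : Claim_equal_brute_force_islice := by
  intro n k _ hpre
  obtain ⟨hn, hk, hb⟩ := hpre
  unfold Spec_brute_force_islice brute_force_islice brute_force_islice_alt
  rw [if_pos ⟨hk, by omega⟩, if_pos ⟨hk, by rw [PySem.Int.le_floordiv_iff_mul_le (by omega)]; omega⟩]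
  have h := pvMain (n - 1).toNat n 1 k (2 * k.toNat + 2) (le_refl 1) (by omega) hk
    (by nlinarith) (by omega) (by omega)
  rw [show (1 : Int) + 1 = 2 from by norm_num] at h
  rw [h, Option.getD_some]
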